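-- pv_equiv track=rewrite | github.com/lulf87/pdf-report-checker | python_backend/services/pdf_parser.py | _find_original_position
-- ===== SOURCE A (Python) =====
-- def _find_original_position(original: str, cleaned: str, cleaned_pos: int) -> int:
--     """
--     将清理后的位置映射回原始字符串位置
--     """
--     original_pos = 0
--     cleaned_idx = 0
--
--     for char in original:
--         if cleaned_idx >= cleaned_pos:
--             return original_pos
--         if not char.isspace():
--             cleaned_idx += 1
--         original_pos += 1
--
--     return len(original)
-- ===== SOURCE B (Python) =====
-- def _find_original_position(original: str, cleaned: str, cleaned_pos: int) -> int:
--     non_ws = [i for i, c in enumerate(original) if not c.isspace()]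
--     if cleaned_pos <= 0:
--         return 0
--     if cleaned_pos <= len(non_ws):
--         return non_ws[cleaned_pos - 1] + 1
--     return len(original)
-- ===== Notes on version B (the rewrite author's own statement) =====
-- stated objective: alternative
-- what changed: Replaces the running-counter scan with early return by a precomputed list of non-whitespace positions and a direct index lookup with two boundary branches.
import Mathlib
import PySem

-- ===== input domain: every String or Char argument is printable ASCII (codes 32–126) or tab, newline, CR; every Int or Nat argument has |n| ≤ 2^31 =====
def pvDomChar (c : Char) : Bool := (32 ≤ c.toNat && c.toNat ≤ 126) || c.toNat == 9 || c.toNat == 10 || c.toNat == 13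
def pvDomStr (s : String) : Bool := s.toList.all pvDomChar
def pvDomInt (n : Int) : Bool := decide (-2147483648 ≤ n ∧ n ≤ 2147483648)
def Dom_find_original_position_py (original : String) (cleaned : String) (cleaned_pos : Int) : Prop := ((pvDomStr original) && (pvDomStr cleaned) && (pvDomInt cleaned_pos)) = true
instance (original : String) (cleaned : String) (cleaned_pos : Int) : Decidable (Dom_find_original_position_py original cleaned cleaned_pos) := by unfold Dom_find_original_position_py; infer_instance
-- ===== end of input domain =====

-- B replaces A's running-counter scan (early return) by a precomputed list of
-- non-whitespace positions plus a direct index lookup (alternative decomposition, same cost).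


-- ===== PORT A =====
-- A's for-loop with its two accumulators and the early return; `total` is len(original),
-- returned when the loop runs off the end of the string
def fopLoop (p : Int) (total : Int) : List Char → Int → Int → Int
  | [], _, _ => total
  | c :: rest, opos, cidx =>
    if cidx ≥ p then opos
    else fopLoop p total rest (opos + 1)
      (if !(PySem.Chars.isspace c) then cidx + 1 else cidx)

def find_original_position_py (original : String) (cleaned : String) (cleaned_pos : Int) : Int :=
  fopLoop cleaned_pos (PySem.Str.len original) original.toList 0 0

-- ===== PORT B =====
def find_original_position_py_alt (original : String) (cleaned : String) (cleaned_pos : Int) : Int :=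
  let non_ws : List Int :=
    ((PySem.List.enumerate original.toList 0).filter (fun q => !(PySem.Chars.isspace q.2))).map (·.1)
  if cleaned_pos ≤ 0 then 0
  else if cleaned_pos ≤ (non_ws.length : Int) then
    -- non_ws[cleaned_pos - 1]: the index is in range in this branch, the default is never used
    PySem.List.pyGetD non_ws (cleaned_pos - 1) 0 + 1
  else PySem.Str.len original

-- ===== PRECONDITION & SPEC =====
def Spec_find_original_position_py (original : String) (cleaned : String) (cleaned_pos : Int) (out : Int) : Prop := out = find_original_position_py_alt original cleaned cleaned_pos
instance (original : String) (cleaned : String) (cleaned_pos : Int) (out : Int) : Decidable (Spec_find_original_position_py original cleaned cleaned_pos out) := by unfold Spec_find_original_position_py; infer_instance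

-- ===== CLAIM (what is proved, stated in full; the proofs are below) =====
def Claim_equal_find_original_position_py : Prop := ∀ (original : String) (cleaned : String) (cleaned_pos : Int), Dom_find_original_position_py original cleaned cleaned_pos → Spec_find_original_position_py original cleaned cleaned_pos (find_original_position_py original cleaned cleaned_pos)

-- ===== LEMMAS AND PROOFS =====

-- the value A's loop computes, with the accumulators factored out:
-- index one past the p-th non-whitespace char, or the list length if there are fewer than p
def fopIdx : Int → List Char → Int
  | _, [] => 0
  | p, c :: rest =>
    if p ≤ 0 then 0
    else 1 + fopIdx (p - (if !(PySem.Chars.isspace c) then 1 else 0)) rest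

-- the non-whitespace position list of B, on the list side
def nwList (l : List Char) : List Int :=
  ((PySem.List.enumerate l 0).filter (fun q => !(PySem.Chars.isspace q.2))).map (·.1)

lemma fopLoop_eq (p : Int) : ∀ (l : List Char) (opos cidx total : Int),
    opos + (l.length : Int) = total →
    fopLoop p total l opos cidx = opos + fopIdx (p - cidx) l := by
  intro l
  induction l with
  | nil =>
    intro opos cidx total h
    simp only [fopLoop, fopIdx, List.length_nil, Int.natCast_zero] at h ⊢
    omega
  | cons c rest ih =>
    intro opos cidx total h
    simp only [fopLoop]
    by_cases hc : cidx ≥ p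
    · rw [if_pos hc, show fopIdx (p - cidx) (c :: rest) = 0 from by
        simp [fopIdx, show p - cidx ≤ 0 by omega]]
      ring
    · rw [if_neg hc,
        ih (opos + 1) _ total (by simp only [List.length_cons] at h; push_cast at h ⊢; omega)]
      simp only [fopIdx, if_neg (show ¬ (p - cidx ≤ 0) by omega)]
      by_cases hws : PySem.Chars.isspace c
      · simp [hws]
        ring
      · simp only [hws, Bool.not_false, if_true]
        rw [show p - (cidx + 1) = p - cidx - 1 from by ring]
        ring

lemma enumerate_shift (l : List Char) : ∀ (s : Int),
    PySem.List.enumerate l s = (PySem.List.enumerate l 0).map (fun q => (q.1 + s, q.2)) := by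
  induction l with
  | nil => intro s; simp [PySem.List.enumerate_nil]
  | cons c rest ih =>
    intro s
    rw [PySem.List.enumerate_cons, PySem.List.enumerate_cons, ih (0 + 1), ih (s + 1)]
    simp [List.map_map, Function.comp]
    intro a b _
    omega

lemma nwList_cons (c : Char) (l : List Char) :
    nwList (c :: l) = (if !(PySem.Chars.isspace c) then [(0 : Int)] else [])
      ++ (nwList l).map (· + 1) := by
  unfold nwList
  rw [PySem.List.enumerate_cons, enumerate_shift l (0 + 1)]
  by_cases hc : PySem.Chars.isspace c
  · simp [hc, List.filter_map, List.map_map, Function.comp_def]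
  · simp [hc, List.filter_map, List.map_map, Function.comp_def]

-- xs[i] on a cons at a positive index steps to the tail (indices here are in range)
lemma pyGetD_cons_pos (a : Int) (xs : List Int) (i : Int) (d : Int) (h : 1 ≤ i) :
    PySem.List.pyGetD (a :: xs) i d = PySem.List.pyGetD xs (i - 1) d := by
  obtain ⟨k, rfl⟩ : ∃ k : Nat, i = (k : Int) + 1 := ⟨(i - 1).toNat, by omega⟩
  rw [show ((k : Int) + 1) = ((k + 1 : Nat) : Int) from by push_cast; ring,
    PySem.List.pyGetD_natCast, show ((k + 1 : Nat) : Int) - 1 = ((k : Nat) : Int) from by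
      push_cast; ring, PySem.List.pyGetD_natCast, List.getD_cons_succ]

-- the core equivalence: the loop value equals B's table lookup
lemma fopIdx_eq_alt (l : List Char) : ∀ (p : Int),
    fopIdx p l =
      (if p ≤ 0 then 0
       else if p ≤ ((nwList l).length : Int) then PySem.List.pyGetD (nwList l) (p - 1) 0 + 1
       else (l.length : Int)) := by
  induction l with
  | nil => intro p; simp [fopIdx, nwList, PySem.List.enumerate_nil]; omega
  | cons c rest ih =>
    intro p
    by_cases hp : p ≤ 0
    · simp [fopIdx, hp]
    · rw [if_neg hp, nwList_cons]
      by_cases hc : PySem.Chars.isspace c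
      · -- whitespace head: B's table is the shifted tail table, A skips the char
        have e : fopIdx p (c :: rest) = 1 + fopIdx p rest := by simp [fopIdx, hp, hc]
        rw [e, ih p, if_neg hp, show (if !(PySem.Chars.isspace c) then [(0 : Int)] else []) = []
          from by simp [hc], List.nil_append]
        by_cases hlen : p ≤ ((nwList rest).length : Int)
        · rw [if_pos hlen, if_pos (by simp only [List.length_map]; exact hlen)]
          rw [PySem.List.pyGetD_eq_getElem (nwList rest) (i := p - 1) 0 (by omega) (by omega),
              PySem.List.pyGetD_eq_getElem ((nwList rest).map (· + 1)) (i := p - 1) 0 (by omega)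
                (by simp only [List.length_map]; omega)]
          simp only [List.getElem_map]
          ring
        · rw [if_neg hlen, if_neg (by simp only [List.length_map]; exact hlen)]
          simp only [List.length_cons]
          push_cast; ring
      · -- non-whitespace head: B's table is 0 :: shifted tail table
        have e : fopIdx p (c :: rest) = 1 + fopIdx (p - 1) rest := by simp [fopIdx, hp, hc]
        rw [e, ih (p - 1), show (if !(PySem.Chars.isspace c) then [(0 : Int)] else []) = [(0 : Int)]
          from by simp [hc], List.singleton_append]
        by_cases h1 : p = 1
        · subst h1
          rw [if_pos (by norm_num), if_pos (by simp only [List.length_cons, List.length_map]; omega)]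
          rw [show (1 : Int) - 1 = 0 from rfl, PySem.List.pyGetD_zero_cons]
          norm_num
        · rw [if_neg (show ¬ (p - 1 ≤ 0) by omega)]
          by_cases hlen : p - 1 ≤ ((nwList rest).length : Int)
          · rw [if_pos hlen, if_pos (by simp only [List.length_cons, List.length_map]; omega)]
            rw [pyGetD_cons_pos (0 : Int) ((nwList rest).map (· + 1)) (p - 1) 0 (by omega),
              show (0 : Int) = (fun x => x + 1) (-1) from by norm_num,
              PySem.List.pyGetD_map (fun x => x + 1) (nwList rest) (p - 1 - 1) (-1)]
            rw [PySem.List.pyGetD_eq_getElem (nwList rest) (i := p - 1 - 1)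
                ((fun x => x + 1) (-1) : Int) (by omega) (by omega),
              PySem.List.pyGetD_eq_getElem (nwList rest) (i := p - 1 - 1) (-1 : Int)
                (by omega) (by omega)]
            ring
          · rw [if_neg hlen, if_neg (by simp only [List.length_cons, List.length_map]; omega)]
            simp only [List.length_cons]
            push_cast; ring

-- ===== VERDICT (by name: the statement is the Claim_ definition above) =====
theorem find_original_position_py_spec : Claim_equal_find_original_position_py := by
  intro original cleaned cleaned_pos _
  unfold Spec_find_original_position_py find_original_position_py find_original_position_py_alt
  rw [fopLoop_eq cleaned_pos original.toList 0 0 (PySem.Str.len original)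
      (by simp [PySem.Str.len_eq])]
  rw [sub_zero, zero_add, fopIdx_eq_alt]
  simp only [nwList, PySem.Str.len_eq]
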